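-- pv_equiv track=rewrite | github.com/gabriel-piedade95/Biologia_de_Sistemas | convergencia_redes.py | _cal_T_estados
-- ===== SOURCE A (Python) =====
-- def _cal_T_estados(lista, est_ant):
--
-- 	if est_ant == lista[est_ant]:
-- 		return 0
--
-- 	if est_ant not in lista:
-- 		return 1
--
-- 	anteriores = []
-- 	for k in range(0,  len(lista)):
-- 		if lista[k] == est_ant and k != est_ant:
-- 			anteriores.append(k)
--
-- 	n = 1
-- 	for i in range(0, len(anteriores)):
-- 		n += _cal_T_estados(lista, anteriores[i])
--
-- 	return n
-- ===== SOURCE B (Python) =====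
-- def _cal_T_estados(lista, est_ant):
--
--     if est_ant == lista[est_ant]:
--         return 0
--
--     if est_ant not in lista:
--         return 1
--
--     preds = {}
--     for k, v in enumerate(lista):
--         if k != v:
--             preds.setdefault(v, []).append(k)
--
--     def size(v):
--         n = 1
--         for k in preds.get(v, []):
--             n += size(k)
--         return n
--
--     return size(est_ant)
-- ===== Notes on version B (the rewrite author's own statement) =====
-- stated objective: faster
-- what changed: B precomputes the reverse-adjacency dict (predecessors of every state) in one pass over the list, so the recursion looks predecessors up instead of rescanning the whole list at every recursive call.
import Mathlib
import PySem

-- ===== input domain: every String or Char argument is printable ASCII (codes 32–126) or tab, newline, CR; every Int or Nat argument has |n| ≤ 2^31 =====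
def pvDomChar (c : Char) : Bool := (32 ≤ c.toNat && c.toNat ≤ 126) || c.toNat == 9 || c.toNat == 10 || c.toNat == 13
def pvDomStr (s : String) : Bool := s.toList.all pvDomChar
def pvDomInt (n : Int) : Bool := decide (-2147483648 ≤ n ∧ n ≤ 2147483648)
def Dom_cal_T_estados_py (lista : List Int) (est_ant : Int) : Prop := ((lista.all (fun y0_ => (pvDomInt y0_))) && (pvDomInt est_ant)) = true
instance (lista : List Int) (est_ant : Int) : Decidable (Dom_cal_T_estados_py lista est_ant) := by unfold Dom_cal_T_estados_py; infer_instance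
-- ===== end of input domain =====

-- B replaces A's per-call rescan of the whole list by a reverse-adjacency dict built once (objective: faster).

-- ===== PORT A =====
-- A's recursion, bounded by fuel (a totality guard only; the fuel lista.length + 2 passed below
-- always suffices where the Python returns, since recursion depth is bounded by the chain length).
def calA_rec (lista : List Int) : Nat → Int → Int
  | 0, _ => 0
  | fuel+1, est_ant =>
    match PySem.List.pyGet? lista est_ant with
    | none => 0   -- IndexError in Python; excluded by Pre_
    | some x =>
      if est_ant = x then 0
      else if est_ant ∉ lista then 1
      else
        let anteriores := (PySem.List.pyRange 0 (lista.length : Int) 1).foldl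
          (fun acc k => if PySem.List.pyGetD lista k 0 = est_ant ∧ k ≠ est_ant then acc ++ [k] else acc) []
        anteriores.foldl (fun n i => n + calA_rec lista fuel i) 1

def cal_T_estados_py (lista : List Int) (est_ant : Int) : Int :=
  calA_rec lista (lista.length + 2) est_ant

-- ===== PORT B =====
-- preds.setdefault(v, []).append(k)  ≡  preds[v] = preds.get(v, []) + [k]  =  Dict.modify v [] (· ++ [k])
def buildPreds (lista : List Int) : PySem.Dict Int (List Int) :=
  (PySem.List.enumerate lista).foldl
    (fun d p => if p.1 ≠ p.2 then d.modify p.2 [] (fun l => l ++ [p.1]) else d)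
    PySem.Dict.empty

-- B's inner recursion `size`, bounded by the same totality-guard fuel.
def sizeRec (preds : PySem.Dict Int (List Int)) : Nat → Int → Int
  | 0, _ => 0
  | fuel+1, v => (preds.getD v []).foldl (fun n k => n + sizeRec preds fuel k) 1

def cal_T_estados_py_alt (lista : List Int) (est_ant : Int) : Int :=
  match PySem.List.pyGet? lista est_ant with
  | none => 0   -- IndexError in Python; excluded by Pre_
  | some x =>
    if est_ant = x then 0
    else if est_ant ∉ lista then 1
    else sizeRec (buildPreds lista) (lista.length + 2) est_ant

-- ===== PRECONDITION & SPEC =====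
-- forward step of the successor map, defined only on valid indices
def stepF (lista : List Int) (v : Int) : Option Int :=
  if 0 ≤ v ∧ v < lista.length then some (lista.getD v.toNat 0) else none

def iterF (lista : List Int) : Nat → Int → Option Int
  | 0, v => some v
  | m+1, v => (stepF lista v).bind (iterF lista m)

-- Pre_ is exactly where Python A returns normally: est_ant is a valid (possibly negative) index,
-- and est_ant is either its own successor (A returns 0) or does not lie on a cycle of length ≥ 2
-- of the successor map (on such a cycle A recurses forever).
def Pre_cal_T_estados_py (lista : List Int) (est_ant : Int) : Prop :=
  (PySem.List.pyGet? lista est_ant).isSome = true ∧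
  (est_ant = (PySem.List.pyGet? lista est_ant).getD 0 ∨
   ∀ m, m < lista.length → iterF lista (m+1) est_ant ≠ some est_ant)
instance (lista : List Int) (est_ant : Int) : Decidable (Pre_cal_T_estados_py lista est_ant) := by
  unfold Pre_cal_T_estados_py; infer_instance

def pvWitness_cal_T_estados_py : List Int × Int := ([1, -7], 0)

def Spec_cal_T_estados_py (lista : List Int) (est_ant : Int) (out : Int) : Prop := out = cal_T_estados_py_alt lista est_ant
instance (lista : List Int) (est_ant : Int) (out : Int) : Decidable (Spec_cal_T_estados_py lista est_ant out) := by unfold Spec_cal_T_estados_py; infer_instance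

-- ===== CLAIM (what is proved, stated in full; the proofs are below) =====
def Claim_equal_cal_T_estados_py : Prop := ∀ (lista : List Int) (est_ant : Int), Dom_cal_T_estados_py lista est_ant → Pre_cal_T_estados_py lista est_ant → Spec_cal_T_estados_py lista est_ant (cal_T_estados_py lista est_ant)

-- ===== LEMMAS AND PROOFS =====

-- the canonical predecessor list both ports compute
def predC (lista : List Int) (v : Int) : List Int :=
  (PySem.List.pyRange 0 (lista.length : Int) 1).filter
    (fun k => decide (PySem.List.pyGetD lista k 0 = v ∧ k ≠ v))

theorem anteriores_eq (lista : List Int) (v : Int) :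
    (PySem.List.pyRange 0 (lista.length : Int) 1).foldl
      (fun acc k => if PySem.List.pyGetD lista k 0 = v ∧ k ≠ v then acc ++ [k] else acc) []
    = predC lista v := by
  rw [PySem.List.foldl_append_ite_eq_filter]
  rfl

theorem getD_buildPreds (lista : List Int) (v : Int) :
    (buildPreds lista).getD v [] = predC lista v := by
  unfold buildPreds
  have h1 := PySem.List.foldl_ite_eq_foldl_filter (p := fun q : Int × Int => q.1 ≠ q.2)
      (f := fun (d : PySem.Dict Int (List Int)) (q : Int × Int) => d.modify q.2 [] (fun l => l ++ [q.1]))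
      (PySem.List.enumerate lista) PySem.Dict.empty
  have h2 : List.foldl (fun (d : PySem.Dict Int (List Int)) (q : Int × Int) => d.modify q.2 [] (fun l => l ++ [q.1])) PySem.Dict.empty
      ((PySem.List.enumerate lista).filter (fun p : Int × Int => decide (p.1 ≠ p.2)))
      = List.foldl (fun (d : PySem.Dict Int (List Int)) (q : Int × Int) => d.modify q.1 [] (fun l => l ++ [q.2])) PySem.Dict.empty
      (((PySem.List.enumerate lista).filter (fun p : Int × Int => decide (p.1 ≠ p.2))).map Prod.swap) := by
    rw [List.foldl_map]; rfl
  rw [h1, h2, PySem.Dict.getD_foldl_modify_append, PySem.List.enumerate_eq_map_pyRange lista 0]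
  simp only [List.filter_map, List.map_map, List.filter_filter, Function.comp, Prod.swap,
    PySem.Dict.getD_empty, List.nil_append]
  unfold predC
  rw [show ((fun (x : Int × Int) => x.2) ∘ Prod.swap ∘ fun j => (j, PySem.List.pyGetD lista j 0)) = (id : Int → Int) from rfl, List.map_id]
  apply List.filter_congr
  intro a _
  by_cases h : PySem.List.pyGetD lista a 0 = v
  · simp [h]
  · simp [h]

theorem mem_predC {lista : List Int} {v k : Int} (h : k ∈ predC lista v) :
    PySem.List.pyGet? lista k = some v ∧ k ≠ v := by
  unfold predC at h
  rw [List.mem_filter] at h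
  obtain ⟨hr, hd⟩ := h
  rw [PySem.List.mem_pyRange_one] at hr
  rw [decide_eq_true_iff] at hd
  obtain ⟨hget, hne⟩ := hd
  refine ⟨?_, hne⟩
  have hk : k = ((k.toNat : Nat) : Int) := by omega
  have hlt : k.toNat < lista.length := by omega
  rw [hk] at hget ⊢
  rw [PySem.List.pyGet?_natCast, List.getElem?_eq_getElem hlt]
  rw [PySem.List.pyGetD_natCast, List.getD_eq_getElem lista 0 hlt] at hget
  rw [hget]

theorem predC_eq_nil_of_not_mem {lista : List Int} {v : Int} (h : v ∉ lista) :
    predC lista v = [] := by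
  unfold predC
  rw [List.filter_eq_nil_iff]
  intro k hk
  rw [PySem.List.mem_pyRange_one] at hk
  rw [decide_eq_true_iff]
  rintro ⟨hget, -⟩
  apply h
  have hlt : k.toNat < lista.length := by omega
  have hk2 : k = ((k.toNat : Nat) : Int) := by omega
  rw [hk2, PySem.List.pyGetD_natCast, List.getD_eq_getElem lista 0 hlt] at hget
  rw [← hget]
  exact List.getElem_mem hlt

theorem rec_eq (lista : List Int) : ∀ (fuel : Nat) (v : Int),
    (∃ x, PySem.List.pyGet? lista v = some x ∧ v ≠ x) →
    calA_rec lista fuel v = sizeRec (buildPreds lista) fuel v := by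
  intro fuel
  induction fuel with
  | zero => intro v _; rfl
  | succ f ih =>
    rintro v ⟨x, hx, hne⟩
    rw [calA_rec, sizeRec, getD_buildPreds]
    simp only [hx]
    rw [if_neg hne]
    by_cases hmem : v ∈ lista
    · rw [if_neg (not_not_intro hmem), anteriores_eq]
      exact PySem.List.foldl_congr_mem _ _ _ _ (fun acc k hk => by
        obtain ⟨h1, h2⟩ := mem_predC hk
        rw [ih k ⟨v, h1, h2⟩])
    · rw [if_pos hmem, predC_eq_nil_of_not_mem hmem]
      rfl

-- ===== VERDICT (by name: the statement is the Claim_ definition above) =====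
theorem cal_T_estados_py_spec : Claim_equal_cal_T_estados_py := by
  intro lista est_ant _dom _pre
  unfold Spec_cal_T_estados_py cal_T_estados_py cal_T_estados_py_alt
  cases hx : PySem.List.pyGet? lista est_ant with
  | none => rw [calA_rec]; simp [hx]
  | some x =>
    by_cases hfix : est_ant = x
    · subst hfix
      rw [calA_rec]
      simp [hx]
    · by_cases hmem : est_ant ∈ lista
      · show calA_rec lista (lista.length + 2) est_ant =
            (if est_ant = x then 0 else if est_ant ∉ lista then 1
             else sizeRec (buildPreds lista) (lista.length + 2) est_ant)
        rw [if_neg hfix, if_neg (not_not_intro hmem)]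
        exact rec_eq lista _ est_ant ⟨x, hx, hfix⟩
      · rw [calA_rec]
        simp [hx, hfix, hmem]
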